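-- pv_equiv track=rewrite | github.com/Kudito98/Codesignal-tasks | code-arcade/120-digitDifferenceSort/digitDifferenceSort.py | solution
-- ===== SOURCE A (Python) =====
-- def solution(a):
--     diff = [list(str(i)) for i in a]
--     for i in range(len(diff)):
--         diff[i] = [int(j) for j in diff[i]]
--         diff[i] = max(diff[i])-min(diff[i])
--     indices = [i for i in range(len(a))]
--     combined = [list(i) for i in zip(diff,a,indices)]
--     combined = sorted(combined,key = lambda x: (x[0],-x[2]))
--     a = [x[1] for x in combined]
--     return a
-- ===== SOURCE B (Python) =====
-- def solution(a):
--     buckets = [[] for _ in range(10)]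
--     for v in reversed(a):
--         digits = [int(c) for c in str(v)]
--         buckets[max(digits) - min(digits)].append(v)
--     result = []
--     for bucket in buckets:
--         result += bucket
--     return result
-- ===== Notes on version B (the rewrite author's own statement) =====
-- stated objective: alternative
-- what changed: Replaces the comparison sort keyed by (digit-difference, -index) with a 10-bucket distribution pass: each value is appended to the bucket of its digit difference while scanning the input in reverse (which reproduces the descending-index tie order), and the buckets are concatenated.
import Mathlib
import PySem

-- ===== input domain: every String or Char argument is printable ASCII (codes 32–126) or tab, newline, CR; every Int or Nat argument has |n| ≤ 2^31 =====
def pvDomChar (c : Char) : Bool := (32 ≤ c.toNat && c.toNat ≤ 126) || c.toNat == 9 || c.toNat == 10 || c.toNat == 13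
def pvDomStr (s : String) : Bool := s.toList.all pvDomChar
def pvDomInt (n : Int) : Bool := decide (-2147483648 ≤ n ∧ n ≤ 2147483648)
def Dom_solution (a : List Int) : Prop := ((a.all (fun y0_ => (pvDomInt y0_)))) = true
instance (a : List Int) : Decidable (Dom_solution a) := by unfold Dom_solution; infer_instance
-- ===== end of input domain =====

-- B replaces A's comparison sort keyed by (digit difference, -index) with a 10-bucket
-- distribution pass over the reversed input; equivalence is proved for nonnegative inputs
-- (on a negative element both Pythons raise ValueError at int('-')).

-- ===== PORT A =====
def solution (a : List Int) : List Int :=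
  -- diff = [list(str(i)) for i in a]; the loop then turns each entry into max-min of its digit values
  let diff : List Int := (a.map (fun i => (PySem.Int.toChars i))).map (fun cs =>
    let js : List Int := cs.map (fun j => (PySem.Int.ofChars? [j]).getD 0)  -- int(j); ValueError (Pre_ excludes it) ported as getD 0
    (PySem.List.max? js (fun x => x)).getD 0 - (PySem.List.min? js (fun x => x)).getD 0)
  let indices : List Int := (List.range a.length).map (fun i => Int.ofNat i)
  let combined : List (Int × Int × Int) := (diff.zip (a.zip indices)).map (fun p => (p.1, p.2.1, p.2.2))
  let sortedc := PySem.List.sorted2 combined (fun x => x.1) (fun x => -x.2.2)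
  sortedc.map (fun x => x.2.1)

-- ===== PORT B =====
def digitDiff (v : Int) : Int :=
  let digits : List Int := (PySem.Int.toChars v).map (fun c => (PySem.Int.ofChars? [c]).getD 0)
  (PySem.List.max? digits (fun x => x)).getD 0 - (PySem.List.min? digits (fun x => x)).getD 0

def solution_alt (a : List Int) : List Int :=
  let buckets : List (List Int) :=
    a.reverse.foldl (fun bs v =>
      let d := (digitDiff v).toNat
      bs.set d (bs[d]! ++ [v])) (List.replicate 10 [])
  buckets.flatten

-- ===== PRECONDITION & SPEC =====
-- Pre_ excludes lists containing a negative element: there str(i) starts with '-' and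
-- both A and B raise ValueError at int('-').
def Pre_solution (a : List Int) : Prop := ∀ v ∈ a, 0 ≤ v
instance (a : List Int) : Decidable (Pre_solution a) := by unfold Pre_solution; infer_instance
def pvWitness_solution : List Int := [12, 21, 3, 90]
def Spec_solution (a : List Int) (out : List Int) : Prop := out = solution_alt a
instance (a : List Int) (out : List Int) : Decidable (Spec_solution a out) := by unfold Spec_solution; infer_instance

-- ===== CLAIM (what is proved, stated in full; the proofs are below) =====
def Claim_equal_solution : Prop := ∀ (a : List Int), Dom_solution a → Pre_solution a → Spec_solution a (solution a)

-- ===== LEMMAS AND PROOFS =====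

-- digit-value facts -------------------------------------------------------

theorem digit_mem_cases (c : Char) (h : c.isDigit = true) :
    c ∈ ['0','1','2','3','4','5','6','7','8','9'] := by
  have hd : 48 ≤ c.toNat ∧ c.toNat ≤ 57 := by
    simpa [Char.isDigit, Char.le_def, decide_eq_true_iff] using h
  have hoc := Char.ofNat_toNat c
  have : c.toNat = 48 ∨ c.toNat = 49 ∨ c.toNat = 50 ∨ c.toNat = 51 ∨ c.toNat = 52 ∨
      c.toNat = 53 ∨ c.toNat = 54 ∨ c.toNat = 55 ∨ c.toNat = 56 ∨ c.toNat = 57 := by omega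
  rcases this with h|h|h|h|h|h|h|h|h|h <;>
    (rw [h] at hoc; rw [← hoc]; decide)

theorem digitVal_bounds (c : Char) (h : c.isDigit = true) :
    0 ≤ (PySem.Int.ofChars? [c]).getD 0 ∧ (PySem.Int.ofChars? [c]).getD 0 ≤ 9 := by
  have := digit_mem_cases c h
  fin_cases this <;> decide

theorem toDigits_ne_nil (n : Nat) : Nat.toDigits 10 n ≠ [] := by
  rw [Nat.toDigits_eq_if (by norm_num)]
  split <;> simp

theorem digitDiff_bounds (v : Int) (hv : 0 ≤ v) : 0 ≤ digitDiff v ∧ digitDiff v ≤ 9 := by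
  unfold digitDiff
  have htc : PySem.Int.toChars v = Nat.toDigits 10 v.toNat := by
    simp [PySem.Int.toChars, not_lt.2 hv]
  set js : List Int := (PySem.Int.toChars v).map (fun c => (PySem.Int.ofChars? [c]).getD 0) with hjs
  have hne : js ≠ [] := by
    simp [hjs, htc]
    exact toDigits_ne_nil _
  have hmem : ∀ x ∈ js, 0 ≤ x ∧ x ≤ 9 := by
    intro x hx
    rw [hjs, htc] at hx
    obtain ⟨c, hc, rfl⟩ := List.mem_map.1 hx
    exact digitVal_bounds c (Nat.isDigit_of_mem_toDigits (by norm_num) (by norm_num) hc)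
  obtain ⟨m, hm⟩ : ∃ m, PySem.List.max? js (fun x => x) = some m := by
    cases h : PySem.List.max? js (fun x => x) with
    | none => exact absurd ((PySem.List.max?_eq_none_iff _ _).1 h) hne
    | some m => exact ⟨m, rfl⟩
  obtain ⟨m', hm'⟩ : ∃ m', PySem.List.min? js (fun x => x) = some m' := by
    cases h : PySem.List.min? js (fun x => x) with
    | none => exact absurd ((PySem.List.min?_eq_none_iff _ _).1 h) hne
    | some m => exact ⟨m, rfl⟩
  have h1 := hmem m (PySem.List.max?_mem hm)
  have h2 := hmem m' (PySem.List.min?_mem hm')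
  have h3 : m' ≤ m := PySem.List.max?_isMax hm m' (PySem.List.min?_mem hm')
  show 0 ≤ (PySem.List.max? js fun x => x).getD 0 - (PySem.List.min? js fun x => x).getD 0 ∧ (PySem.List.max? js fun x => x).getD 0 - (PySem.List.min? js fun x => x).getD 0 ≤ 9
  rw [hm, hm']
  simp only [Option.getD_some]
  omega

-- insertion-sort congruence: sorted2 with agreeing comparisons is sorted ----

theorem insertBy_congr {α : Type} (b1 b2 : α → α → Bool) (x : α) (ys : List α)
    (h : ∀ y ∈ ys, b1 x y = b2 x y) :
    PySem.List.insertBy b1 x ys = PySem.List.insertBy b2 x ys := by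
  induction ys with
  | nil => rfl
  | cons y ys ih =>
    rw [PySem.List.insertBy, PySem.List.insertBy, h y (by simp),
      ih (fun z hz => h z (by simp [hz]))]

theorem foldl_insertBy_congr {α : Type} (b1 b2 : α → α → Bool) (S : α → Prop)
    (h : ∀ x y, S x → S y → b1 x y = b2 x y) :
    ∀ (xs acc : List α), (∀ x ∈ xs, S x) → (∀ y ∈ acc, S y) →
    xs.foldl (fun a x => PySem.List.insertBy b1 x a) acc
      = xs.foldl (fun a x => PySem.List.insertBy b2 x a) acc := by
  intro xs
  induction xs with
  | nil => intro acc _ _; rfl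
  | cons x xs ih =>
    intro acc hxs hacc
    simp only [List.foldl_cons]
    rw [insertBy_congr b1 b2 x acc (fun y hy => h x y (hxs x (by simp)) (hacc y hy))]
    exact ih _ (fun z hz => hxs z (by simp [hz]))
      (fun y hy => by
        rcases (PySem.List.mem_insertBy _ _ _ _).1 hy with rfl | hy'
        · exact hxs y (by simp)
        · exact hacc y hy')

theorem sorted2_eq_sorted {α : Type} (xs : List α) (k1 k2 : α → Int) (K : α → Int)
    (h : ∀ x ∈ xs, ∀ y ∈ xs,
      (decide (k1 x < k1 y) || (!decide (k1 y < k1 x) && decide (k2 x < k2 y))) = decide (K x < K y)) :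
    PySem.List.sorted2 xs k1 k2 = PySem.List.sorted xs K := by
  rw [PySem.List.sorted_eq_foldl_insertBy]
  show xs.foldl (fun acc x => PySem.List.insertBy _ x acc) [] = _
  exact foldl_insertBy_congr _ _ (· ∈ xs) (fun x y hx hy => h x hx y hy) xs [] (fun _ hx => hx) (by simp)

-- the bucket fold of B, characterised ------------------------------------

def bstep (bs : List (List Int)) (v : Int) : List (List Int) :=
  let d := (digitDiff v).toNat
  bs.set d (bs[d]! ++ [v])

theorem bucket_length (l : List Int) : ∀ bs : List (List Int),
    (l.foldl bstep bs).length = bs.length := by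
  induction l with
  | nil => intro bs; rfl
  | cons v l ih => intro bs; rw [List.foldl_cons, ih]; simp [bstep]

theorem bucket_get (l : List Int) : ∀ (bs : List (List Int)) (d : Nat), d < bs.length →
    (l.foldl bstep bs)[d]?
      = some (bs[d]! ++ (l.filter (fun v => (digitDiff v).toNat == d))) := by
  induction l with
  | nil =>
    intro bs d hd
    simp [List.getElem!_eq_getElem?_getD, List.getElem?_eq_getElem hd]
  | cons v l ih =>
    intro bs d hd
    rw [List.foldl_cons]
    have hlen : (bstep bs v).length = bs.length := by simp [bstep]
    rw [ih (bstep bs v) d (by rw [hlen]; exact hd)]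
    by_cases hv : (digitDiff v).toNat = d
    · have hd' : (digitDiff v).toNat < bs.length := hv ▸ hd
      have h1 : (bstep bs v)[d]! = bs[d]! ++ [v] := by
        subst hv
        simp [bstep, List.getElem!_eq_getElem?_getD, List.getElem?_set_self', List.getElem?_eq_getElem hd']
      rw [h1]
      simp [hv]
    · have h1 : (bstep bs v)[d]! = bs[d]! := by
        simp [bstep, List.getElem!_eq_getElem?_getD, List.getElem?_set_ne hv]
      rw [h1]
      simp [hv]

theorem alt_normal (a : List Int) :
    solution_alt a
      = (List.range 10).flatMap (fun d => a.reverse.filter (fun v => (digitDiff v).toNat == d)) := by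
  show (a.reverse.foldl bstep (List.replicate 10 [])).flatten = _
  rw [List.flatMap_def]
  congr 1
  apply List.ext_getElem?
  intro d
  by_cases hd : d < 10
  · rw [bucket_get a.reverse _ d (by simpa using hd)]
    rw [List.getElem?_map, List.getElem?_range hd]
    simp [List.getElem!_eq_getElem?_getD]
    interval_cases d <;> rfl
  · rw [List.getElem?_eq_none, List.getElem?_eq_none]
    · simpa using hd
    · rw [bucket_length]; simpa using hd

-- generic permutation / pairwise plumbing ---------------------------------

theorem flatMap_congr_mem {α β : Type} (ds : List α) (f g : α → List β)
    (h : ∀ d ∈ ds, f d = g d) : ds.flatMap f = ds.flatMap g := by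
  induction ds with
  | nil => rfl
  | cons d ds ih =>
    simp only [List.flatMap_cons]
    rw [h d (by simp), ih (fun x hx => h x (by simp [hx]))]

theorem perm_flatMap_congr {α β : Type} (ds : List α) (f g : α → List β)
    (h : ∀ d ∈ ds, (f d).Perm (g d)) : (ds.flatMap f).Perm (ds.flatMap g) := by
  induction ds with
  | nil => exact List.Perm.refl _
  | cons d ds ih =>
    simp only [List.flatMap_cons]
    exact (h d (by simp)).append (ih (fun x hx => h x (by simp [hx])))

theorem classify_perm {γ : Type} (key : γ → Nat) :
    ∀ (ds : List Nat) (l : List γ), ds.Nodup → (∀ x ∈ l, key x ∈ ds) →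
    (ds.flatMap (fun d => l.filter (fun x => key x == d))).Perm l := by
  intro ds
  induction ds with
  | nil =>
    intro l _ hcov
    have : l = [] := by
      cases l with
      | nil => rfl
      | cons x l => exact absurd (hcov x (by simp)) (by simp)
    simp [this]
  | cons d0 ds ih =>
    intro l hnd hcov
    simp only [List.flatMap_cons]
    have hstep : ∀ d ∈ ds, l.filter (fun x => key x == d)
        = (l.filter (fun x => !(key x == d0))).filter (fun x => key x == d) := by
      intro d hd
      have hne : d ≠ d0 := fun h => (List.nodup_cons.1 hnd).1 (h ▸ hd)
      rw [List.filter_filter]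
      apply List.filter_congr
      intro x _
      by_cases h : key x = d
      · simp [h, hne]
      · simp [h]
    rw [flatMap_congr_mem ds _ _ hstep]
    have hperm := ih (l.filter (fun x => !(key x == d0))) (List.nodup_cons.1 hnd).2
      (fun x hx => by
        rcases List.mem_filter.1 hx with ⟨hxl, hxd⟩
        rcases List.mem_cons.1 (hcov x hxl) with h | h
        · simp [h] at hxd
        · exact h)
    exact (hperm.append_left _).trans (List.filter_append_perm _ l)

theorem pairwise_flatMap {α β : Type} (R : β → β → Prop) (ds : List α) (f : α → List β)
    (h1 : ∀ d ∈ ds, (f d).Pairwise R)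
    (h2 : ds.Pairwise (fun d d' => ∀ x ∈ f d, ∀ y ∈ f d', R x y)) :
    (ds.flatMap f).Pairwise R := by
  induction ds with
  | nil => exact List.Pairwise.nil
  | cons d ds ih =>
    simp only [List.flatMap_cons]
    rw [List.pairwise_append]
    refine ⟨h1 d (by simp), ih (fun x hx => h1 x (by simp [hx])) (List.Pairwise.sublist (by simp) h2), ?_⟩
    intro x hx y hy
    rcases List.mem_flatMap.1 hy with ⟨d', hd', hyd'⟩
    exact (List.rel_of_pairwise_cons h2 hd') x hx y hyd'

-- A's combined triples and the single linear key --------------------------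

def Fc (p : Int × Nat) : Int × Int × Int := (digitDiff p.1, p.1, (p.2 : Int))
def Kk (n : Nat) (x : Int × Int × Int) : Int := x.1 * n - x.2.2

theorem combined_eq (a : List Int) :
    ((a.map digitDiff).zip (a.zip ((List.range a.length).map fun i => Int.ofNat i))).map
        (fun p => (p.1, p.2.1, p.2.2))
      = a.zipIdx.map Fc := by
  apply List.ext_getElem
  · simp
  · intro i h1 h2
    have hi : i < a.length := by simpa using h2
    simp only [List.getElem_map, List.getElem_zip, List.getElem_zipIdx, Fc]
    rw [List.getElem_range]
    simp

theorem solutionA_normal (a : List Int) :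
    solution a = (PySem.List.sorted2 (a.zipIdx.map Fc) (fun x => x.1) (fun x => -x.2.2)).map
      (fun x => x.2.1) := by
  have h1 : (a.map (fun i => PySem.Int.toChars i)).map (fun cs =>
      let js : List Int := cs.map (fun j => (PySem.Int.ofChars? [j]).getD 0)
      (PySem.List.max? js (fun x => x)).getD 0 - (PySem.List.min? js (fun x => x)).getD 0)
      = a.map digitDiff := by
    rw [List.map_map]; rfl
  show (PySem.List.sorted2
      ((((a.map (fun i => PySem.Int.toChars i)).map (fun cs : List Char =>
        let js : List Int := cs.map (fun j => (PySem.Int.ofChars? [j]).getD 0)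
        (PySem.List.max? js (fun x => x)).getD 0 - (PySem.List.min? js (fun x => x)).getD 0)).zip
          (a.zip ((List.range a.length).map (fun i => Int.ofNat i)))).map
          (fun p : Int × (Int × Int) => ((p.1, p.2.1, p.2.2) : Int × Int × Int)))
      (fun x : Int × Int × Int => x.1) (fun x : Int × Int × Int => -x.2.2)).map
      (fun x : Int × Int × Int => x.2.1) = _
  rw [h1, combined_eq]

theorem mem_combined (a : List Int) (x : Int × Int × Int) (hx : x ∈ a.zipIdx.map Fc) :
    ∃ p : Int × Nat, x = Fc p ∧ p.1 ∈ a ∧ p.2 < a.length := by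
  rcases List.mem_map.1 hx with ⟨p, hp, rfl⟩
  obtain ⟨-, hlt, heq⟩ := List.mem_zipIdx (x := p.1) (i := p.2) (by simpa using hp)
  exact ⟨p, rfl, by rw [heq]; exact List.getElem_mem _, by omega⟩

theorem cross_key (d1 d2 i j : Int) (n : Nat) (h : d1 < d2) (hi : 0 ≤ i) (_hi' : i < (n : Int))
    (_hj : 0 ≤ j) (hj' : j < (n : Int)) : d1 * n - i < d2 * n - j := by
  have h1 : (d1 + 1) * n ≤ d2 * n :=
    mul_le_mul_of_nonneg_right (by omega) (by positivity)
  nlinarith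

theorem equiv_main (a : List Int) (hpre : ∀ v ∈ a, 0 ≤ v) : solution a = solution_alt a := by
  rw [solutionA_normal, alt_normal]
  have hagree : ∀ x ∈ a.zipIdx.map Fc, ∀ y ∈ a.zipIdx.map Fc,
      (decide (x.1 < y.1) || (!decide (y.1 < x.1) && decide (-x.2.2 < -y.2.2)))
        = decide (Kk a.length x < Kk a.length y) := by
    intro x hx y hy
    obtain ⟨p, rfl, hpa, hplt⟩ := mem_combined a x hx
    obtain ⟨q, rfl, hqa, hqlt⟩ := mem_combined a y hy
    show (decide (digitDiff p.1 < digitDiff q.1) || (!decide (digitDiff q.1 < digitDiff p.1)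
        && decide (-(p.2 : Int) < -(q.2 : Int))))
      = decide (digitDiff p.1 * (a.length : Int) - (p.2 : Int)
          < digitDiff q.1 * (a.length : Int) - (q.2 : Int))
    have hp2 : (p.2 : Int) < (a.length : Int) := by exact_mod_cast hplt
    have hq2 : (q.2 : Int) < (a.length : Int) := by exact_mod_cast hqlt
    rcases lt_trichotomy (digitDiff p.1) (digitDiff q.1) with h | h | h
    · rw [decide_eq_true h]
      simp only [Bool.true_or]
      symm
      exact decide_eq_true (cross_key _ _ _ _ _ h (by positivity) hp2 (by positivity) hq2)
    · rw [decide_eq_false (by omega : ¬ digitDiff p.1 < digitDiff q.1),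
        decide_eq_false (by omega : ¬ digitDiff q.1 < digitDiff p.1)]
      simp only [Bool.false_or, Bool.not_false, Bool.true_and]
      rw [decide_eq_decide, h, sub_lt_sub_iff_left, neg_lt_neg_iff]
    · rw [decide_eq_false (by omega : ¬ digitDiff p.1 < digitDiff q.1), decide_eq_true h]
      simp only [Bool.not_true, Bool.false_and, Bool.false_or]
      symm
      exact decide_eq_false (not_lt.2
        (cross_key _ _ _ _ _ h (by positivity) hq2 (by positivity) hp2).le)
  rw [sorted2_eq_sorted _ _ _ (Kk a.length) hagree]
  have hds : ∀ p : Int × Nat, p ∈ a.zipIdx → digitDiff p.1 = ((digitDiff p.1).toNat : Int) ∧ (digitDiff p.1).toNat < 10 := by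
    intro p hp
    obtain ⟨-, hlt, heq⟩ := List.mem_zipIdx (x := p.1) (i := p.2) (by simpa using hp)
    have hmem : p.1 ∈ a := by rw [heq]; exact List.getElem_mem _
    obtain ⟨hb1, hb2⟩ := digitDiff_bounds p.1 (hpre p.1 hmem)
    constructor
    · exact (Int.toNat_of_nonneg hb1).symm
    · omega
  have hstep : PySem.List.sorted (a.zipIdx.map Fc) (Kk a.length)
      = (List.range 10).flatMap (fun d =>
          ((a.zipIdx.filter (fun p => (digitDiff p.1).toNat == d)).reverse.map Fc)) := by
    apply PySem.List.sorted_eq_of_perm_of_pairwise_lt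
    · -- permutation
      have hm : (List.range 10).flatMap (fun d =>
          ((a.zipIdx.filter (fun p => (digitDiff p.1).toNat == d)).reverse.map Fc))
          = ((List.range 10).flatMap (fun d =>
            (a.zipIdx.filter (fun p => (digitDiff p.1).toNat == d)).reverse)).map Fc := by
        rw [List.map_flatMap]
      rw [hm]
      apply List.Perm.map
      refine List.Perm.trans ?_ (classify_perm (fun p => (digitDiff p.1).toNat) (List.range 10)
        a.zipIdx List.nodup_range ?_)
      · exact perm_flatMap_congr _ _ _ (fun d _ => (List.reverse_perm _))
      · intro p hp
        exact List.mem_range.2 (hds p hp).2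
    · -- pairwise strictly increasing key
      apply pairwise_flatMap
      · intro d hd
        rw [List.pairwise_map, List.pairwise_reverse]
        have hzp : a.zipIdx.Pairwise (fun p q : Int × Nat => p.2 < q.2) := by
          rw [List.pairwise_iff_getElem]
          intro i j hi hj hij
          simp only [List.getElem_zipIdx]
          simpa using hij
        refine (hzp.filter _).imp_of_mem ?_
        intro p q hp hq hlt
        have hdp := (List.mem_filter.1 hp)
        have hdq := (List.mem_filter.1 hq)
        have hp10 := hds p hdp.1
        have hq10 := hds q hdq.1
        have hpd : digitDiff p.1 = (d : Int) := by
          have hb : (digitDiff p.1).toNat = d := by simpa using hdp.2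
          rw [hp10.1, hb]
        have hqd : digitDiff q.1 = (d : Int) := by
          have hb : (digitDiff q.1).toNat = d := by simpa using hdq.2
          rw [hq10.1, hb]
        show Kk a.length (Fc q) < Kk a.length (Fc p)
        show digitDiff q.1 * a.length - (q.2 : Int) < digitDiff p.1 * a.length - (p.2 : Int)
        rw [hpd, hqd, sub_lt_sub_iff_left]
        exact_mod_cast hlt
      · refine List.pairwise_lt_range.imp_of_mem ?_
        intro d d' hd hd' hlt x hx y hy
        rcases List.mem_map.1 hx with ⟨p, hp, rfl⟩
        rcases List.mem_map.1 hy with ⟨q, hq, rfl⟩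
        have hp' := List.mem_filter.1 (List.mem_reverse.1 hp)
        have hq' := List.mem_filter.1 (List.mem_reverse.1 hq)
        have hpd : digitDiff p.1 = (d : Int) := by
          have hb : (digitDiff p.1).toNat = d := by simpa using hp'.2
          rw [(hds p hp'.1).1, hb]
        have hqd : digitDiff q.1 = (d' : Int) := by
          have hb : (digitDiff q.1).toNat = d' := by simpa using hq'.2
          rw [(hds q hq'.1).1, hb]
        obtain ⟨-, hplt, -⟩ := List.mem_zipIdx (x := p.1) (i := p.2) (by simpa using hp'.1)
        obtain ⟨-, hqlt, -⟩ := List.mem_zipIdx (x := q.1) (i := q.2) (by simpa using hq'.1)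
        show digitDiff p.1 * a.length - (p.2 : Int) < digitDiff q.1 * a.length - (q.2 : Int)
        rw [hpd, hqd]
        exact cross_key _ _ _ _ _ (by exact_mod_cast hlt) (by positivity)
          (by exact_mod_cast show p.2 < a.length by omega) (by positivity)
          (by exact_mod_cast show q.2 < a.length by omega)
  rw [hstep, List.map_flatMap]
  apply flatMap_congr_mem
  intro d hd
  show ((a.zipIdx.filter (fun p => (digitDiff p.1).toNat == d)).reverse.map Fc).map (fun x => x.2.1)
      = a.reverse.filter (fun v => (digitDiff v).toNat == d)
  rw [List.map_map, List.filter_reverse, List.map_reverse]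
  congr 1
  conv_rhs => rw [← List.zipIdx_map_fst 0 a, List.filter_map]
  rfl

-- ===== VERDICT (by name: the statement is the Claim_ definition above) =====
theorem solution_spec : Claim_equal_solution := by
  intro a _ hpre
  exact equiv_main a hpre
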